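-- pv_equiv track=rewrite | github.com/Balut-moko/procon-grassmaker-archive | atcoder/arc134/arc134_b/28882402.py | calc_next
-- ===== SOURCE A (Python) =====
-- def calc_next(S):
--     N = len(S)
--     res = [[N] * 26 for _ in range(N + 1)]
--     for i in range(N - 1, -1, -1):
--         for j in range(26):
--             res[i][j] = res[i + 1][j]
--         res[i][ord(S[i]) - ord("a")] = i
--     return res
-- ===== SOURCE B (Python) =====
-- def calc_next(S):
--     N = len(S)
--     occ = [[] for _ in range(26)]
--     for p, ch in enumerate(S):
--         occ[ord(ch) - ord("a")].append(p)
--     cols = []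
--     for c in range(26):
--         col = []
--         for p in occ[c]:
--             col.extend([p] * (p + 1 - len(col)))
--         col.extend([N] * (N + 1 - len(col)))
--         cols.append(col)
--     return [list(row) for row in zip(*cols)]
-- ===== Notes on version B (the rewrite author's own statement) =====
-- stated objective: alternative
-- what changed: B makes one forward pass that buckets each position into its letter's occurrence list, then builds each of the 26 next-occurrence columns by segment-filling from those occurrence lists, and transposes the columns into rows, instead of A's backward pass that copies the previous 26-entry row position by position.
import Mathlib
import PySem

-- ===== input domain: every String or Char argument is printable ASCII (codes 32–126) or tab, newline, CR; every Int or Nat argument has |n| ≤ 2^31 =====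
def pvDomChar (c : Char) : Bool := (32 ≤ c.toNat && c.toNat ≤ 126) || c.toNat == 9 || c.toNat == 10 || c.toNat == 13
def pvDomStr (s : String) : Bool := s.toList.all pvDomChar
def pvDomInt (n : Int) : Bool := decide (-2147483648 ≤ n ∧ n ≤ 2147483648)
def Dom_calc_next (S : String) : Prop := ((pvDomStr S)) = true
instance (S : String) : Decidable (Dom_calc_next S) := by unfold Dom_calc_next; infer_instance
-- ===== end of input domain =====

-- B builds the table by bucketing positions per letter in one forward pass, segment-filling the
-- 26 next-occurrence columns from the occurrence lists, and transposing; an alternative algorithm,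
-- not claimed faster.

-- ===== PORT A =====
def calc_next (S : String) : List (List Int) :=
  let L := S.toList
  let N := L.length
  let res0 : List (List Int) := List.replicate (N + 1) (List.replicate 26 (N : Int))
  (PySem.List.pyRange ((N : Int) - 1) (-1) (-1)).foldl (fun res i =>
    let res := (PySem.List.pyRange 0 26 1).foldl (fun r j =>
      PySem.List.pySetD r i (PySem.List.pySetD (PySem.List.pyGetD r i [])
        j (PySem.List.pyGetD (PySem.List.pyGetD r (i + 1) []) j 0))) res
    PySem.List.pySetD res i (PySem.List.pySetD (PySem.List.pyGetD res i [])
      (((PySem.List.pyGetD L i ' ').toNat : Int) - 97) i)) res0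

-- ===== PORT B =====
-- pvZipT is the port of zip(*cols) (+ the list() per row): rows until the shortest column ends.
-- pvZipTGo's fuel (the first column's length, an upper bound on the row count) only makes the
-- recursion structural; it never cuts the computation short.
def pvZipTGo : Nat → List (List Int) → List (List Int)
  | 0, _ => []
  | n + 1, cols =>
    if cols ≠ [] ∧ cols.all (fun c => !c.isEmpty) then
      cols.map (fun c => c.headD 0) :: pvZipTGo n (cols.map List.tail)
    else []

def pvZipT (cols : List (List Int)) : List (List Int) :=
  pvZipTGo (cols.headD []).length cols

def calc_next_alt (S : String) : List (List Int) :=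
  let L := S.toList
  let N := L.length
  let occ0 : List (List Int) := List.replicate 26 []
  let occ := (PySem.List.enumerate L 0).foldl (fun occ ps =>
    PySem.List.pySetD occ ((ps.2.toNat : Int) - 97)
      (PySem.List.pyGetD occ ((ps.2.toNat : Int) - 97) [] ++ [ps.1])) occ0
  let cols := (PySem.List.pyRange 0 26 1).foldl (fun cols c =>
    let col := (PySem.List.pyGetD occ c []).foldl (fun col p =>
      col ++ List.replicate (p + 1 - (col.length : Int)).toNat p) []
    let col := col ++ List.replicate (N + 1 - col.length) ((N : Int))
    cols ++ [col]) []
  pvZipT cols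

-- ===== PRECONDITION & SPEC =====
-- Pre_ excludes exactly the strings with a character outside codes 71..122 ('G'..'z'):
-- there ord(c)-97 lies outside [-26, 26) and both A and B raise IndexError.
def Pre_calc_next (S : String) : Prop :=
  (S.toList.all (fun c => 71 ≤ c.toNat && c.toNat ≤ 122)) = true
instance (S : String) : Decidable (Pre_calc_next S) := by unfold Pre_calc_next; infer_instance
def pvWitness_calc_next : String := ("ab")
def Spec_calc_next (S : String) (out : List (List Int)) : Prop := out = calc_next_alt S
instance (S : String) (out : List (List Int)) : Decidable (Spec_calc_next S out) := by unfold Spec_calc_next; infer_instance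

-- ===== CLAIM (what is proved, stated in full; the proofs are below) =====
def Claim_equal_calc_next : Prop := ∀ (S : String), Dom_calc_next S → Pre_calc_next S → Spec_calc_next S (calc_next S)

-- ===== LEMMAS AND PROOFS =====

-- ---- A-side characterisation: rows of next-occurrence values, finalised backwards ----

-- the final row for position k (A's backward loop computes these rows)
def pvRow (L : List Char) (k : Nat) : List Int :=
  if h : k < L.length then
    PySem.List.pySetD (pvRow L (k + 1)) (((L[k].toNat : Int)) - 97) (k : Int)
  else List.replicate 26 (L.length : Int)
termination_by L.length - k

lemma pvRow_length (L : List Char) (k : Nat) : (pvRow L k).length = 26 := by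
  rw [pvRow]
  split
  · rw [PySem.List.length_pySetD, pvRow_length L (k + 1)]
  · simp
termination_by L.length - k

lemma pv_getD_set_self {α : Type} (l : List α) (i : Nat) (x d : α) (h : i < l.length) :
    (l.set i x).getD i d = x := by
  simp [List.getD_eq_getElem?_getD, h]

lemma pv_getD_set_ne {α : Type} (l : List α) (i j : Nat) (x d : α) (h : i ≠ j) :
    (l.set i x).getD j d = l.getD j d := by
  simp [List.getD_eq_getElem?_getD, List.getElem?_set_ne h]

lemma pv_set_getD_self {α : Type} (l : List α) (i : Nat) (d : α) (h : i < l.length) :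
    l.set i (l.getD i d) = l := by
  rw [List.getD_eq_getElem?_getD, List.getElem?_eq_getElem h]
  simp

lemma pv_set_take_succ {α : Type} (a : List α) (j : Nat) (x : α) (h : j < a.length) :
    (a.set j x).take (j + 1) = a.take j ++ [x] := by
  rw [List.take_set, List.take_add_one, List.getElem?_eq_getElem h]
  have hlen : (a.take j).length ≤ j := by simp
  rw [List.set_append_right j x (by simp)]
  simp [Nat.min_eq_left h.le]

-- A's table after the rows i ≥ k have been finalised
def pvTA (L : List Char) (k : Nat) : List (List Int) :=
  (List.range (L.length + 1)).map (fun m => if m < k then List.replicate 26 (L.length : Int) else pvRow L m)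

lemma pvTA_length (L : List Char) (k : Nat) : (pvTA L k).length = L.length + 1 := by
  simp [pvTA]

lemma pvTA_getD (L : List Char) (k m : Nat) (hm : m < L.length + 1) :
    (pvTA L k).getD m [] = if m < k then List.replicate 26 (L.length : Int) else pvRow L m := by
  unfold pvTA
  rw [List.getD_eq_getElem?_getD]
  simp [hm]

lemma pv_copy_inner (i : Nat) (j : Nat) (res : List (List Int)) (hj : j ≤ 26)
    (hi : i + 1 < res.length)
    (ha : (res.getD i []).length = 26) (hb : (res.getD (i + 1) []).length = 26) :
    (PySem.List.pyRange (j : Int) 26 1).foldl (fun r jj =>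
      PySem.List.pySetD r (i : Int) (PySem.List.pySetD (PySem.List.pyGetD r (i : Int) [])
        jj (PySem.List.pyGetD (PySem.List.pyGetD r ((i : Int) + 1) []) jj 0))) res
      = res.set i ((res.getD i []).take j ++ (res.getD (i + 1) []).drop j) := by
  have hii : i < res.length := by omega
  by_cases h26 : j < 26
  · rw [PySem.List.pyRange_one_cons (by exact_mod_cast h26), List.foldl_cons]
    have hc1 : ((i : Int) + 1) = ((i + 1 : Nat) : Int) := by push_cast; ring
    have hc2 : ((j : Int) + 1) = ((j + 1 : Nat) : Int) := by push_cast; ring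
    have hstep : (PySem.List.pySetD res (i : Int) (PySem.List.pySetD (PySem.List.pyGetD res (i : Int) [])
        ((j : Int)) (PySem.List.pyGetD (PySem.List.pyGetD res ((i : Int) + 1) []) ((j : Int)) 0)))
        = res.set i ((res.getD i []).set j ((res.getD (i + 1) []).getD j 0)) := by
      simp only [hc1, PySem.List.pySetD_natCast, PySem.List.pyGetD_natCast]
    rw [hstep, hc2]
    have h1 : i + 1 < (res.set i ((res.getD i []).set j ((res.getD (i + 1) []).getD j 0))).length := by
      simpa using hi
    have h2 : ((res.set i ((res.getD i []).set j ((res.getD (i + 1) []).getD j 0))).getD i []) =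
        (res.getD i []).set j ((res.getD (i + 1) []).getD j 0) :=
      pv_getD_set_self _ _ _ _ hii
    have h3 : ((res.set i ((res.getD i []).set j ((res.getD (i + 1) []).getD j 0))).getD (i + 1) []) =
        res.getD (i + 1) [] :=
      pv_getD_set_ne _ _ _ _ _ (by omega)
    rw [pv_copy_inner i (j + 1) _ (by omega) h1 (by rw [h2]; simpa using ha) (by rw [h3]; exact hb)]
    rw [h2, h3, List.set_set]
    congr 1
    have hja : j < (res.getD i []).length := by omega
    have hjb : j < (res.getD (i + 1) []).length := by omega
    have hjb' : j < (res[i + 1]?.getD []).length := by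
      simpa [List.getD_eq_getElem?_getD] using hjb
    rw [pv_set_take_succ _ _ _ hja, List.drop_eq_getElem_cons hjb]
    simp only [List.getD_eq_getElem?_getD]
    rw [List.getElem?_eq_getElem hjb']
    simp [List.append_assoc]
  · have hj26 : j = 26 := by omega
    subst hj26
    rw [PySem.List.pyRange_one_eq_nil (by norm_num), List.foldl_nil]
    rw [← ha, List.take_length]
    have : (res.getD (i + 1) []).drop (res.getD i []).length = [] := by
      rw [ha, ← hb]; exact List.drop_length
    rw [this, List.append_nil, pv_set_getD_self _ _ _ hii]
termination_by 26 - j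

lemma pvTA_step (L : List Char) (k : Nat) (hk : k < L.length) :
    (pvTA L (k + 1)).set k (pvRow L k) = pvTA L k := by
  apply List.ext_getElem
  · simp [pvTA]
  · intro m h1 h2
    have hm : m < L.length + 1 := by simpa [pvTA] using h2
    rw [List.getElem_set]
    simp only [pvTA, List.getElem_map, List.getElem_range]
    rcases Nat.lt_trichotomy m k with h | h | h
    · rw [if_neg (by omega), if_pos (by omega), if_pos (by omega)]
    · subst h
      rw [if_pos rfl, if_neg (by omega)]
    · rw [if_neg (by omega), if_neg (by omega), if_neg (by omega)]

lemma pvA_loop (L : List Char) (k : Nat) (hk : k ≤ L.length) :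
    (PySem.List.pyRange ((k : Int) - 1) (-1) (-1)).foldl (fun res i =>
      let res := (PySem.List.pyRange 0 26 1).foldl (fun r j =>
        PySem.List.pySetD r i (PySem.List.pySetD (PySem.List.pyGetD r i [])
          j (PySem.List.pyGetD (PySem.List.pyGetD r (i + 1) []) j 0))) res
      PySem.List.pySetD res i (PySem.List.pySetD (PySem.List.pyGetD res i [])
        (((PySem.List.pyGetD L i ' ').toNat : Int) - 97) i)) (pvTA L k) = pvTA L 0 := by
  match k with
  | 0 =>
    rw [PySem.List.pyRange_neg_one_eq_nil (by norm_num), List.foldl_nil]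
  | k + 1 =>
    have hk' : k < L.length := by omega
    have h1 : ((k + 1 : Nat) : Int) - 1 = (k : Int) := by push_cast; ring
    rw [h1, PySem.List.pyRange_neg_one_cons
      (by exact lt_of_lt_of_le (by norm_num) (Int.natCast_nonneg k)), List.foldl_cons]
    have hrec := pv_copy_inner k 0 (pvTA L (k + 1)) (by omega)
      (by rw [pvTA_length]; omega)
      (by rw [pvTA_getD L (k + 1) k (by omega), if_pos (by omega)]; simp)
      (by rw [pvTA_getD L (k + 1) (k + 1) (by omega), if_neg (by omega)]; exact pvRow_length L (k + 1))
    rw [Nat.cast_zero, List.take_zero, List.drop_zero, List.nil_append,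
      pvTA_getD L (k + 1) (k + 1) (by omega), if_neg (by omega)] at hrec
    have hLk : PySem.List.pyGetD L ((k : Int)) ' ' = L[k] := by
      rw [PySem.List.pyGetD_natCast, List.getD_eq_getElem?_getD, List.getElem?_eq_getElem hk']
      rfl
    simp only [hrec, hLk]
    have hgd : PySem.List.pyGetD ((pvTA L (k + 1)).set k (pvRow L (k + 1))) ((k : Int)) [] =
        pvRow L (k + 1) := by
      rw [PySem.List.pyGetD_natCast]
      exact pv_getD_set_self (pvTA L (k + 1)) k (pvRow L (k + 1)) [] (by rw [pvTA_length]; omega)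
    have hrowk : PySem.List.pySetD (pvRow L (k + 1)) (((L[k].toNat : Int)) - 97) ((k : Int)) = pvRow L k := by
      conv_rhs => rw [pvRow]
      rw [dif_pos hk']
    rw [hgd, hrowk, PySem.List.pySetD_natCast, List.set_set, pvTA_step L k hk']
    exact pvA_loop L k (by omega)
termination_by k

lemma pvTA_top (L : List Char) :
    List.replicate (L.length + 1) (List.replicate 26 (L.length : Int)) = pvTA L L.length := by
  apply List.ext_getElem
  · simp [pvTA]
  · intro m h1 h2
    have hm : m < L.length + 1 := by simpa using h1
    simp only [pvTA, List.getElem_map, List.getElem_range, List.getElem_replicate]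
    by_cases h : m < L.length
    · rw [if_pos h]
    · have hmL : m = L.length := by omega
      rw [if_neg h, hmL, pvRow, dif_neg (by omega)]

lemma pvA_eq (S : String) :
    calc_next S = (List.range (S.toList.length + 1)).map (fun m => pvRow S.toList m) := by
  unfold calc_next
  simp only []
  rw [pvTA_top S.toList, pvA_loop S.toList S.toList.length le_rfl]
  unfold pvTA
  apply List.map_congr_left
  intro m hm
  rw [if_neg (by omega)]

-- ---- shared: the effective column of a character (Python's wrapped index ord(c)-97) ----

def pvEff (ch : Char) : Nat := if 97 ≤ ch.toNat then ch.toNat - 97 else ch.toNat - 71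

lemma pvEff_lt (ch : Char) (h : 71 ≤ ch.toNat ∧ ch.toNat ≤ 122) : pvEff ch < 26 := by
  unfold pvEff; split <;> omega

lemma pvSetD_neg {α : Type} (xs : List α) (k : Nat) (v : α) (h1 : 0 < k) (h2 : k ≤ xs.length) :
    PySem.List.pySetD xs (-(k : Int)) v = xs.set (xs.length - k) v := by
  unfold PySem.List.pySetD PySem.List.pySet?
  rw [PySem.List.pyIdx?]
  split
  · rename_i h
    omega
  · split
    · rename_i h h'
      simp only [Option.map_some, Option.getD_some]
      congr 1
      omega
    · rename_i h h'
      exfalso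
      omega

-- writing at xs[ord(ch)-97] (wrapping) is writing at the effective column
lemma pvSetD_eff {α : Type} (xs : List α) (ch : Char) (v : α)
    (h : 71 ≤ ch.toNat ∧ ch.toNat ≤ 122) (hlen : xs.length = 26) :
    PySem.List.pySetD xs ((ch.toNat : Int) - 97) v = xs.set (pvEff ch) v := by
  by_cases hc : 97 ≤ ch.toNat
  · have hcast : ((ch.toNat : Int) - 97) = (((ch.toNat - 97 : Nat)) : Int) := by omega
    rw [hcast, PySem.List.pySetD_natCast]
    unfold pvEff
    rw [if_pos hc]
  · have hcast : ((ch.toNat : Int) - 97) = -(((97 - ch.toNat : Nat)) : Int) := by omega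
    rw [hcast, pvSetD_neg xs (97 - ch.toNat) v (by omega) (by omega)]
    unfold pvEff
    rw [if_neg hc]
    congr 1
    omega

-- reading xs[ord(ch)-97] (wrapping) is reading the effective column
lemma pvGetD_eff {α : Type} (xs : List α) (ch : Char) (d : α)
    (h : 71 ≤ ch.toNat ∧ ch.toNat ≤ 122) (hlen : xs.length = 26) :
    PySem.List.pyGetD xs ((ch.toNat : Int) - 97) d = xs.getD (pvEff ch) d := by
  by_cases hc : 97 ≤ ch.toNat
  · have hcast : ((ch.toNat : Int) - 97) = (((ch.toNat - 97 : Nat)) : Int) := by omega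
    rw [hcast, PySem.List.pyGetD_natCast]
    unfold pvEff
    rw [if_pos hc]
  · have hcast : ((ch.toNat : Int) - 97) = -(((97 - ch.toNat : Nat)) : Int) := by omega
    rw [hcast, PySem.List.pyGetD_neg_natCast xs (97 - ch.toNat) d (by omega) (by omega)]
    unfold pvEff
    rw [if_neg hc]
    have hidx : xs.length - (97 - ch.toNat) = ch.toNat - 71 := by omega
    have hlt : ch.toNat - 71 < xs.length := by omega
    rw [List.getD_eq_getElem?_getD]
    rw [List.getElem?_eq_getElem (by omega)]
    simp [hidx]

-- ---- B-side characterisation ----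

-- pvNext L c k = next position at or after k whose character lands in column c
def pvNext (L : List Char) (c : Nat) (k : Nat) : Int :=
  if h : k < L.length then
    if pvEff L[k] = c then (k : Int) else pvNext L c (k + 1)
  else (L.length : Int)
termination_by L.length - k

-- if the first column-c position at or after i is exactly p, pvNext returns p
lemma pvNext_hit (L : List Char) (c : Nat) (p : Nat) (hp : p < L.length)
    (hm : pvEff L[p] = c) :
    ∀ i, i ≤ p → (∀ q (hq : q < L.length), i ≤ q → q < p → pvEff L[q] ≠ c) →
    pvNext L c i = (p : Int) := by
  intro i hip hno
  rw [pvNext, dif_pos (by omega)]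
  by_cases hip' : i = p
  · subst hip'; rw [if_pos hm]
  · rw [if_neg (hno i (by omega) le_rfl (by omega))]
    exact pvNext_hit L c p hp hm (i + 1) (by omega) (fun q hq h1 h2 => hno q hq (by omega) h2)
termination_by i => p - i

-- if no column-c position lies at or after i, pvNext returns the length
lemma pvNext_miss (L : List Char) (c : Nat) :
    ∀ i, (∀ q (hq : q < L.length), i ≤ q → pvEff L[q] ≠ c) →
    pvNext L c i = (L.length : Int) := by
  intro i hno
  rw [pvNext]
  split
  · case isTrue h =>
    rw [if_neg (hno i h le_rfl)]
    exact pvNext_miss L c (i + 1) (fun q hq h1 => hno q hq (by omega))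
  · rfl
termination_by i => L.length - i

-- rows of A are the 26 pvNext values
lemma pvRowEq (L : List Char) (hlc : ∀ ch ∈ L, 71 ≤ ch.toNat ∧ ch.toNat ≤ 122) (k : Nat) :
    pvRow L k = (List.range 26).map (fun c => pvNext L c k) := by
  rw [pvRow]
  split
  · case isTrue h =>
    rw [pvRowEq L hlc (k + 1)]
    have hc := hlc L[k] (List.getElem_mem h)
    rw [pvSetD_eff _ L[k] _ hc (by simp)]
    have hd : pvEff L[k] < 26 := pvEff_lt L[k] hc
    apply List.ext_getElem
    · simp
    · intro j h1 h2
      have hj : j < 26 := by simpa using h2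
      rw [List.getElem_set]
      simp only [List.getElem_map, List.getElem_range]
      have hN : pvNext L j k = if pvEff (L[k]'h) = j then (k : Int) else pvNext L j (k + 1) := by
        rw [pvNext, dif_pos h]
      rw [hN]
  · case isFalse h =>
    apply List.ext_getElem
    · simp
    · intro j h1 h2
      simp only [List.getElem_replicate, List.getElem_map, List.getElem_range]
      rw [pvNext, dif_neg (by omega)]
termination_by L.length - k

-- occurrence positions in column c at or after k / before p
def pvOccS (L : List Char) (c : Nat) (k : Nat) : List Int :=
  if h : k < L.length then
    (if pvEff L[k] = c then [(k : Int)] else []) ++ pvOccS L c (k + 1)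
  else []
termination_by L.length - k

def pvOccP (L : List Char) (c : Nat) : Nat → List Int
  | 0 => []
  | p + 1 => pvOccP L c p ++
      (if h : p < L.length then (if pvEff L[p] = c then [(p : Int)] else []) else [])

lemma pvOccPS (L : List Char) (c : Nat) : ∀ p, p ≤ L.length →
    pvOccP L c p ++ pvOccS L c p = pvOccS L c 0 := by
  intro p
  induction p with
  | zero => intro _; rw [pvOccP, List.nil_append]
  | succ p IH =>
    intro hp
    have hp' : p < L.length := by omega
    have hS : pvOccS L c p = (if pvEff (L[p]'hp') = c then [((p : Nat) : Int)] else []) ++ pvOccS L c (p + 1) := by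
      rw [pvOccS, dif_pos hp']
    rw [pvOccP, dif_pos hp', List.append_assoc, ← hS]
    exact IH (by omega)

lemma pvOccP_top (L : List Char) (c : Nat) : pvOccP L c L.length = pvOccS L c 0 := by
  have h := pvOccPS L c L.length le_rfl
  rw [pvOccS, dif_neg (by omega), List.append_nil] at h
  exact h

-- the bucketing pass: after processing the whole string, bucket c holds column c's positions
lemma pvBucketLoop (L : List Char) (hlc : ∀ ch ∈ L, 71 ≤ ch.toNat ∧ ch.toNat ≤ 122) :
    ∀ (R : List Char) (p0 : Nat), R = L.drop p0 → p0 ≤ L.length →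
    (PySem.List.enumerate R (p0 : Int)).foldl (fun occ ps =>
        PySem.List.pySetD occ ((ps.2.toNat : Int) - 97)
          (PySem.List.pyGetD occ ((ps.2.toNat : Int) - 97) [] ++ [ps.1]))
      ((List.range 26).map (fun c => pvOccP L c p0))
    = (List.range 26).map (fun c => pvOccP L c L.length) := by
  intro R
  induction R with
  | nil =>
    intro p0 hR hp0
    have hp0L : L.length ≤ p0 := by
      by_contra hlt
      have : L.drop p0 ≠ [] := by simp [List.drop_eq_nil_iff]; omega
      exact this hR.symm
    have : p0 = L.length := by omega
    subst this
    rw [PySem.List.enumerate_nil, List.foldl_nil]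
  | cons r R' IH =>
    intro p0 hR hp0
    have hp0L : p0 < L.length := by
      by_contra hge
      rw [List.drop_eq_nil_of_le (by omega)] at hR
      exact (List.cons_ne_nil r R') hR
    have hdrop : L.drop p0 = L[p0] :: L.drop (p0 + 1) := List.drop_eq_getElem_cons hp0L
    rw [hdrop] at hR
    injection hR with hr hR'
    rw [PySem.List.enumerate_cons, List.foldl_cons]
    have hch := hlc L[p0] (List.getElem_mem hp0L)
    have hchr : 71 ≤ r.toNat ∧ r.toNat ≤ 122 := by rw [hr]; exact hch
    have hlen : ((List.range 26).map (fun c => pvOccP L c p0)).length = 26 := by simp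
    rw [pvGetD_eff _ r _ hchr hlen, pvSetD_eff _ r _ hchr hlen]
    have heff : pvEff r < 26 := pvEff_lt r hchr
    have hstep : ((List.range 26).map (fun c => pvOccP L c p0)).set (pvEff r)
        ((((List.range 26).map (fun c => pvOccP L c p0)).getD (pvEff r) []) ++ [(p0 : Int)])
        = (List.range 26).map (fun c => pvOccP L c (p0 + 1)) := by
      have hgd : (((List.range 26).map (fun c => pvOccP L c p0)).getD (pvEff r) [])
          = pvOccP L (pvEff r) p0 := by
        rw [List.getD_eq_getElem?_getD, List.getElem?_eq_getElem (by simp [heff])]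
        simp
      rw [hgd]
      apply List.ext_getElem
      · simp
      · intro j h1 h2
        have hj : j < 26 := by simpa using h2
        rw [List.getElem_set]
        simp only [List.getElem_map, List.getElem_range]
        conv_rhs => rw [pvOccP, dif_pos hp0L]
        rw [← hr]
        by_cases he : pvEff r = j
        · simp [he]
        · simp [he]
    rw [hstep]
    have h1' : ((p0 : Int) + 1) = (((p0 + 1 : Nat)) : Int) := by push_cast; ring
    rw [h1']
    exact IH (p0 + 1) hR' (by omega)

-- the segment-filling pass over one occurrence list
lemma pvFillLoop (L : List Char) (c : Nat) :
    ∀ (p0 : Nat) (t : Nat), t ≤ p0 → p0 ≤ L.length →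
    (∀ q (hq : q < L.length), t ≤ q → q < p0 → pvEff L[q] ≠ c) →
    ∃ t', t' ≤ L.length ∧
      ((pvOccS L c p0).foldl (fun col p =>
          col ++ List.replicate (p + 1 - (col.length : Int)).toNat p)
        ((List.range t).map (fun i => pvNext L c i))
      = (List.range t').map (fun i => pvNext L c i)) ∧
      (∀ q (hq : q < L.length), t' ≤ q → pvEff L[q] ≠ c) := by
  intro p0 t ht hp0 hno
  by_cases h : p0 < L.length
  · rw [pvOccS, dif_pos h]
    by_cases hm : pvEff L[p0] = c
    · rw [if_pos hm, List.singleton_append, List.foldl_cons]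
      have hcnt : (((p0 : Nat) : Int) + 1 - ((((List.range t).map (fun i => pvNext L c i)).length : Nat) : Int)).toNat
          = p0 + 1 - t := by
        simp only [List.length_map, List.length_range]
        omega
      rw [hcnt]
      have hext : (List.range t).map (fun i => pvNext L c i) ++ List.replicate (p0 + 1 - t) ((p0 : Int))
          = (List.range (p0 + 1)).map (fun i => pvNext L c i) := by
        have hsplit : p0 + 1 = t + (p0 + 1 - t) := by omega
        rw [hsplit, List.range_add, List.map_append]
        congr 1
        apply List.ext_getElem
        · simp
        · intro x h1 h2
          simp only [List.getElem_map, List.getElem_range, List.getElem_replicate]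
          refine (pvNext_hit L c p0 h hm (t + x) ?_ ?_).symm
          · have : x < p0 + 1 - t := by simpa using h2
            omega
          · intro q hq h1' h2'
            exact hno q hq (by omega) h2'
      rw [hext]
      exact pvFillLoop L c (p0 + 1) (p0 + 1) le_rfl (by omega) (fun q hq ha hb => by omega)
    · rw [if_neg hm, List.nil_append]
      refine pvFillLoop L c (p0 + 1) t (by omega) (by omega) ?_
      intro q hq ha hb
      by_cases hqp : q = p0
      · subst hqp; exact hm
      · exact hno q hq ha (by omega)
  · rw [pvOccS, dif_neg h, List.foldl_nil]
    exact ⟨t, by omega, rfl, fun q hq h1 => hno q hq h1 (by omega)⟩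
termination_by p0 => L.length - p0

-- one full column of B equals the pvNext values for its column
lemma pvColumn (L : List Char) (c : Nat) :
    (fun col => col ++ List.replicate (L.length + 1 - col.length) ((L.length : Int)))
      ((pvOccS L c 0).foldl (fun col p =>
          col ++ List.replicate (p + 1 - (col.length : Int)).toNat p) [])
    = (List.range (L.length + 1)).map (fun i => pvNext L c i) := by
  obtain ⟨t', ht'L, hfold, hno⟩ := pvFillLoop L c 0 0 le_rfl (by omega) (fun q hq h1 h2 => by omega)
  simp only [List.range_zero, List.map_nil] at hfold
  simp only []
  rw [hfold]
  have hlen : ((List.range t').map (fun i => pvNext L c i)).length = t' := by simp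
  rw [hlen]
  have hsplit : L.length + 1 = t' + (L.length + 1 - t') := by omega
  rw [hsplit, List.range_add, List.map_append]
  congr 1
  apply List.ext_getElem
  · simp
  · intro x h1 h2
    simp only [List.getElem_map, List.getElem_range, List.getElem_replicate]
    exact (pvNext_miss L c (t' + x) (fun q hq hge => hno q hq (by omega))).symm

-- zip(*·) of columns which are all maps over the same range is the transposed map
lemma pvZipTGo_maps (cs : List Nat) (f : Nat → Nat → Int) :
    ∀ n, cs ≠ [] →
    pvZipTGo n (cs.map (fun c => (List.range n).map (f c)))
      = (List.range n).map (fun k => cs.map (fun c => f c k)) := by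
  intro n
  induction n generalizing f with
  | zero => intro _; simp [pvZipTGo]
  | succ n IH =>
    intro hcs
    rw [pvZipTGo, if_pos]
    · have hhead : (cs.map (fun c => (List.range (n + 1)).map (f c))).map (fun col => col.headD 0)
          = cs.map (fun c => f c 0) := by
        rw [List.map_map]
        apply List.map_congr_left
        intro c _
        simp [List.range_succ_eq_map]
      have htail : (cs.map (fun c => (List.range (n + 1)).map (f c))).map List.tail
          = cs.map (fun c => (List.range n).map (fun k => f c (k + 1))) := by
        rw [List.map_map]
        apply List.map_congr_left
        intro c _
        simp [List.range_succ_eq_map, List.map_map]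
      rw [hhead, htail, IH (fun c k => f c (k + 1)) hcs]
      rw [List.range_succ_eq_map]
      simp [List.map_map]
    · constructor
      · simp [hcs]
      · rw [List.all_eq_true]
        intro col hcol
        rw [List.mem_map] at hcol
        obtain ⟨c, _, hceq⟩ := hcol
        subst hceq
        simp [List.range_succ_eq_map]

lemma pvZipT_maps (cs : List Nat) (f : Nat → Nat → Int) (n : Nat) (hcs : cs ≠ []) :
    pvZipT (cs.map (fun c => (List.range n).map (f c)))
      = (List.range n).map (fun k => cs.map (fun c => f c k)) := by
  unfold pvZipT
  have hhd : ((cs.map (fun c => (List.range n).map (f c))).headD []).length = n := by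
    cases cs with
    | nil => exact absurd rfl hcs
    | cons c rest => simp
  rw [hhd]
  exact pvZipTGo_maps cs f n hcs

lemma pvB_eq (S : String) (hlc : ∀ ch ∈ S.toList, 71 ≤ ch.toNat ∧ ch.toNat ≤ 122) :
    calc_next_alt S = (List.range (S.toList.length + 1)).map
      (fun k => (List.range 26).map (fun c => pvNext S.toList c k)) := by
  have hr : PySem.List.pyRange 0 26 1 = List.map (fun n : Nat => (n : Int)) (List.range 26) := by
    decide
  unfold calc_next_alt
  dsimp only
  have h0 : List.replicate 26 ([] : List Int) = (List.range 26).map (fun c => pvOccP S.toList c 0) := by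
    apply List.ext_getElem
    · simp
    · intro j h1 h2
      simp [pvOccP]
  have hb := pvBucketLoop S.toList hlc S.toList 0 (by simp) (by omega)
  simp only [Nat.cast_zero] at hb
  rw [h0, hb]
  rw [PySem.List.foldl_append_singleton_eq_map, List.nil_append, hr, List.map_map]
  rw [← pvZipT_maps (List.range 26) (fun c k => pvNext S.toList c k) (S.toList.length + 1) (by simp)]
  congr 1
  apply List.map_congr_left
  intro c hc
  have hc26 : c < 26 := by simpa using hc
  have h := pvColumn S.toList c
  rw [← pvOccP_top] at h
  simpa [Function.comp_apply, List.getElem?_range, hc26] using h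

-- ===== VERDICT (by name: the statement is the Claim_ definition above) =====
theorem calc_next_spec : Claim_equal_calc_next := by
  unfold Claim_equal_calc_next
  intro S _ hpre
  unfold Spec_calc_next
  have hlc : ∀ ch ∈ S.toList, 71 ≤ ch.toNat ∧ ch.toNat ≤ 122 := by
    unfold Pre_calc_next at hpre
    rw [List.all_eq_true] at hpre
    intro ch hch
    have h1 := hpre ch hch
    simp only [Bool.and_eq_true, decide_eq_true_eq] at h1
    exact h1
  rw [pvA_eq, pvB_eq S hlc]
  apply List.map_congr_left
  intro k _
  exact pvRowEq S.toList hlc k
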